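-- pv_equiv track=rewrite | github.com/Mezz-Davies/AdventOfCode | 2017/4/main.py | isValidPassphrase
-- ===== SOURCE A (Python) =====
-- def isValidPassphrase(passphrase : str) -> bool:
--     lookup = {}
--     words = passphrase.split(' ')
--     for word in words:
--         if word in lookup:
--             return False
--         else:
--             lookup[word] = True
--
--     return True
-- ===== SOURCE B (Python) =====
-- def isValidPassphrase(passphrase: str) -> bool:
--     s = sorted(passphrase.split(' '))
--     for a, b in zip(s, s[1:]):
--         if a == b:
--             return False
--     return True
-- ===== Notes on version B (the rewrite author's own statement) =====
-- stated objective: alternative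
-- what changed: Replaces A's hash-dict membership loop by sorting the words and scanning adjacent pairs for equality: duplicates in a sorted list are always adjacent, so no hashing or membership structure is needed.
import Mathlib
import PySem

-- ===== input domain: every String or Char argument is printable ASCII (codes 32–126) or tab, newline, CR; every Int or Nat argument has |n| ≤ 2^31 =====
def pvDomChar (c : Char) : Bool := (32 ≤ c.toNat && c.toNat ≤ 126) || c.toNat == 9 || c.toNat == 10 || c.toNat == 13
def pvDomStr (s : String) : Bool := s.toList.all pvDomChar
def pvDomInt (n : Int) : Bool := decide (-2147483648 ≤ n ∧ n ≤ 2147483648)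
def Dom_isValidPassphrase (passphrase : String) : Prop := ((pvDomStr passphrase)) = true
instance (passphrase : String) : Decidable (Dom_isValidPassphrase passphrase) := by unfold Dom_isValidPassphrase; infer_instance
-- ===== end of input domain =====

-- B replaces A's hash-dict membership loop by sorting the words and scanning adjacent
-- pairs for equality (objective: alternative algorithm, similar cost).

-- ===== PORT A =====
-- the for-loop over words with the 'lookup' dict and early 'return False'
def pvLoopA : List String → PySem.Dict String Bool → Bool
  | [], _ => true
  | w :: ws, lookup =>
      if lookup.contains w then false
      else pvLoopA ws (lookup.insert w true)

def isValidPassphrase (passphrase : String) : Bool :=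
  -- passphrase.split(' '): sep is the nonempty literal " ", so split? is always some
  let words := (PySem.Str.split? passphrase " ").getD []
  pvLoopA words PySem.Dict.empty

-- ===== PORT B =====
-- 'for a, b in zip(s, s[1:]): if a == b: return False' / 'return True'
def pvAdjScan : List String → Bool
  | a :: b :: t => if a == b then false else pvAdjScan (b :: t)
  | _ => true

def isValidPassphrase_alt (passphrase : String) : Bool :=
  let s := PySem.List.sorted ((PySem.Str.split? passphrase " ").getD []) (fun x => x) false
  pvAdjScan s

-- ===== PRECONDITION & SPEC =====
def Spec_isValidPassphrase (passphrase : String) (out : Bool) : Prop := out = isValidPassphrase_alt passphrase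
instance (passphrase : String) (out : Bool) : Decidable (Spec_isValidPassphrase passphrase out) := by unfold Spec_isValidPassphrase; infer_instance

-- ===== CLAIM (what is proved, stated in full; the proofs are below) =====
def Claim_equal_isValidPassphrase : Prop := ∀ (passphrase : String), Dom_isValidPassphrase passphrase → Spec_isValidPassphrase passphrase (isValidPassphrase passphrase)

-- ===== LEMMAS AND PROOFS =====

-- A's loop returns true iff the remaining words are distinct and none is already in the dict
theorem pvLoopA_true_iff (ws : List String) (d : PySem.Dict String Bool) :
    pvLoopA ws d = true ↔ ws.Nodup ∧ ∀ w ∈ ws, d.contains w = false := by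
  induction ws generalizing d with
  | nil => simp [pvLoopA]
  | cons w ws ih =>
      by_cases h : d.contains w = true
      · simp only [pvLoopA, h, if_true]
        constructor
        · intro hf; cases hf
        · rintro ⟨_, hall⟩
          have := hall w (by simp)
          rw [h] at this; cases this
      · have h' : d.contains w = false := by
          cases hc : d.contains w
          · rfl
          · exact absurd hc h
        simp only [pvLoopA, h', if_false, Bool.false_eq_true, ih]
        constructor
        · rintro ⟨hnd, hall⟩
          have hwn : w ∉ ws := by
            intro hmem
            have := hall w hmem
            rw [PySem.Dict.contains_insert] at this
            simp at this
          refine ⟨List.nodup_cons.mpr ⟨hwn, hnd⟩, ?_⟩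
          intro x hx
          rcases List.mem_cons.mp hx with rfl | hx'
          · exact h'
          · have := hall x hx'
            rw [PySem.Dict.contains_insert] at this
            cases hb : d.contains x
            · rfl
            · rw [hb] at this; simp at this
        · rintro ⟨hnd, hall⟩
          rcases List.nodup_cons.mp hnd with ⟨hwn, hnd'⟩
          refine ⟨hnd', ?_⟩
          intro x hx
          rw [PySem.Dict.contains_insert]
          have hne : x ≠ w := fun hEq => hwn (hEq ▸ hx)
          simp [hne, hall x (List.mem_cons_of_mem _ hx)]

-- on a (≤)-sorted list, the adjacent scan returns true exactly when the list has no duplicates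
theorem pvAdjScan_true_iff_nodup (l : List String) (hs : l.Pairwise (· ≤ ·)) :
    pvAdjScan l = true ↔ l.Nodup := by
  induction l with
  | nil => simp [pvAdjScan]
  | cons a t ih =>
      cases t with
      | nil => simp [pvAdjScan]
      | cons b t' =>
          rcases List.pairwise_cons.mp hs with ⟨ha, hs'⟩
          by_cases hab : a = b
          · subst hab
            simp [pvAdjScan]
          · have hA : pvAdjScan (a :: b :: t') = pvAdjScan (b :: t') := by
              simp [pvAdjScan, hab]
            rw [hA, ih hs']
            have hanotin : a ∉ b :: t' := by
              intro hmem
              rcases List.mem_cons.mp hmem with rfl | hmem'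
              · exact hab rfl
              · have hab' : a ≤ b := ha b (by simp)
                have hbx : b ≤ a := (List.pairwise_cons.mp hs').1 a hmem'
                exact hab (le_antisymm hab' hbx)
            constructor
            · intro hn
              exact List.nodup_cons.mpr ⟨hanotin, hn⟩
            · intro hn
              exact (List.nodup_cons.mp hn).2

-- ===== VERDICT (by name: the statement is the Claim_ definition above) =====
theorem isValidPassphrase_spec : Claim_equal_isValidPassphrase := by
  intro passphrase _
  unfold Spec_isValidPassphrase isValidPassphrase isValidPassphrase_alt
  set ws := (PySem.Str.split? passphrase " ").getD [] with hws
  set s := PySem.List.sorted ws (fun x => x) false with hs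
  have hperm : s.Perm ws := PySem.List.sorted_perm ws (fun x => x) false
  have hpw : s.Pairwise (· ≤ ·) := by
    have := PySem.List.sorted_pairwise (xs := ws) (key := fun x => x)
    simpa using this
  have hA : pvLoopA ws PySem.Dict.empty = true ↔ ws.Nodup := by
    rw [pvLoopA_true_iff]
    constructor
    · exact fun h => h.1
    · exact fun h => ⟨h, fun w _ => PySem.Dict.contains_empty w⟩
  have hB : pvAdjScan s = true ↔ ws.Nodup := by
    rw [pvAdjScan_true_iff_nodup s hpw, hperm.nodup_iff]
  cases hAv : pvLoopA ws PySem.Dict.empty with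
  | false =>
      have : ¬ ws.Nodup := fun hn => by rw [hA.mpr hn] at hAv; cases hAv
      cases hBv : pvAdjScan s with
      | false => rfl
      | true => exact absurd (hB.mp hBv) this
  | true =>
      have hn := hA.mp hAv
      exact (hB.mpr hn).symm
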